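-- pv_equiv track=rewrite | github.com/inductive-anks1/Programming-Practice | find_lastname.py | find_lastname
-- ===== SOURCE A (Python) =====
-- def find_lastname(first_name, names):
--
--     first_name_list = []
--
--     for i in range(len(names)):
--         first_name_list.append(names[i].split(' ')[0])
--
--     if first_name not in first_name_list:
--         return (None)
--
--     else:
--         for i in range(len(first_name_list)):
--             if first_name_list[i] == first_name:
--                 if len(names[i].split(' ')) >= 2:
--                     return(names[i].split(' ')[-1])
--                 elif len(names[i].split(' ')) == 1:
--                     return('')
-- ===== SOURCE B (Python) =====
-- def find_lastname(first_name, names):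
--     # single pass: no intermediate first-name list, no membership pre-scan
--     for name in names:
--         parts = name.split(' ')
--         if parts[0] == first_name:
--             return parts[-1] if len(parts) >= 2 else ''
--     return None
-- ===== Notes on version B (the rewrite author's own statement) =====
-- stated objective: simpler
-- what changed: One pass over names returning at the first matching split, instead of building a list of all first names, doing a membership test, and then rescanning that list by index with repeated re-splitting.
import Mathlib
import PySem

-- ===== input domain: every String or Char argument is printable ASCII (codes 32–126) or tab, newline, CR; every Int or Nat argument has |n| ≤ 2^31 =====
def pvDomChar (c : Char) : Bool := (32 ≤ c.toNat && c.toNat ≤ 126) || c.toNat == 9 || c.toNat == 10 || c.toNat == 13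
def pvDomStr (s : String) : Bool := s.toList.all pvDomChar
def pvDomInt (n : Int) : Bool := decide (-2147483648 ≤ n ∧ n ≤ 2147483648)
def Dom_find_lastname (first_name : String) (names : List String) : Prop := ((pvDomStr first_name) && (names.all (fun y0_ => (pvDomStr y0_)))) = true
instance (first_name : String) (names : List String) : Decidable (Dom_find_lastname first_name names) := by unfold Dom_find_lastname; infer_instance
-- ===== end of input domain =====

-- B replaces A's build-list / membership-test / index-rescan with a single pass that
-- returns at the first name whose first word matches (objective: simpler).


-- ===== PORT A =====
-- name.split(' '): sep is the non-empty literal " ", so Str.split? is always `some`;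
-- `.getD []` only totalizes the match.
def pvSplitSp (s : String) : List String := (PySem.Str.split? s " ").getD []

-- names[i].split(' ')[0]; the split is never empty, so [0] is exact via getD.
def pvFirst (s : String) : String := PySem.List.pyGetD (pvSplitSp s) 0 ""

-- A's second loop: for i in range(len(first_name_list)): … ; iterates names[i]
-- together with first_name_list[i], transcribed as a walk over the zipped pair list.
def pvScanA (first_name : String) : List (String × String) → Option String
  | [] => none
  | (name, f) :: rest =>
    if f == first_name then
      if 2 ≤ (pvSplitSp name).length then PySem.List.pyGet? (pvSplitSp name) (-1)
      else if (pvSplitSp name).length == 1 then some ""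
      else pvScanA first_name rest
    else pvScanA first_name rest

def find_lastname (first_name : String) (names : List String) : Option String :=
  let first_name_list := names.foldl (fun acc s => acc ++ [pvFirst s]) []
  if first_name_list.contains first_name then
    pvScanA first_name (names.zip first_name_list)
  else none

-- ===== PORT B =====
def pvLoopB (first_name : String) : List String → Option String
  | [] => none
  | name :: rest =>
    if PySem.List.pyGetD (pvSplitSp name) 0 "" == first_name then
      if 2 ≤ (pvSplitSp name).length then PySem.List.pyGet? (pvSplitSp name) (-1)
      else some ""
    else pvLoopB first_name rest

def find_lastname_alt (first_name : String) (names : List String) : Option String :=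
  pvLoopB first_name names

-- ===== PRECONDITION & SPEC =====
def Spec_find_lastname (first_name : String) (names : List String) (out : Option String) : Prop := out = find_lastname_alt first_name names
instance (first_name : String) (names : List String) (out : Option String) : Decidable (Spec_find_lastname first_name names out) := by unfold Spec_find_lastname; infer_instance

-- ===== CLAIM (what is proved, stated in full; the proofs are below) =====
def Claim_equal_find_lastname : Prop := ∀ (first_name : String) (names : List String), Dom_find_lastname first_name names → Spec_find_lastname first_name names (find_lastname first_name names)

-- ===== LEMMAS AND PROOFS =====

theorem pvSplitSp_go_ne_nil (sep : List Char) (fuel : Nat) (l cur : List Char)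
    (acc : List (List Char)) : PySem.Chars.splitOn.go sep fuel l cur acc ≠ [] := by
  induction fuel generalizing l cur acc with
  | zero => simp [PySem.Chars.splitOn.go]
  | succ n ih =>
    cases l with
    | nil => simp [PySem.Chars.splitOn.go]
    | cons c rest =>
      rw [PySem.Chars.splitOn.go]
      split
      · exact ih _ _ _
      · exact ih _ _ _

theorem pvSplitSp_ne_nil (s : String) : pvSplitSp s ≠ [] := by
  have h := PySem.Str.split?_map s " "
  unfold pvSplitSp
  cases hs : PySem.Str.split? s " " with
  | none => simp [hs, PySem.Chars.split?] at h
  | some parts =>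
    rw [hs] at h
    simp [PySem.Chars.split?, PySem.Chars.splitOn] at h
    intro hnil
    simp only [Option.getD_some] at hnil
    subst hnil
    exact pvSplitSp_go_ne_nil _ _ _ _ _ h.symm

theorem pvFoldl_append (l : List String) (acc : List String) :
    l.foldl (fun a s => a ++ [pvFirst s]) acc = acc ++ l.map pvFirst := by
  induction l generalizing acc with
  | nil => simp
  | cons x xs ih => simp [List.foldl_cons, ih]

theorem pvMain (first_name : String) (names : List String) :
    (if (names.map pvFirst).contains first_name then
        pvScanA first_name (names.zip (names.map pvFirst))
      else none) = pvLoopB first_name names := by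
  induction names with
  | nil => simp [pvLoopB]
  | cons name rest ih =>
    have hfirst : pvFirst name = PySem.List.pyGetD (pvSplitSp name) 0 "" := rfl
    have hne := pvSplitSp_ne_nil name
    have hlen : 1 ≤ (pvSplitSp name).length := by
      cases h : pvSplitSp name with
      | nil => exact absurd h hne
      | cons a b => simp
    rw [List.map_cons, List.zip_cons_cons]
    by_cases hmatch : pvFirst name = first_name
    · have hc : ((pvFirst name == first_name) : Bool) = true := by simp [hmatch]
      rw [if_pos (by simp [hmatch]), pvScanA, pvLoopB, ← hfirst, hc,
        if_pos rfl, if_pos rfl]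
      by_cases h2 : 2 ≤ (pvSplitSp name).length
      · rw [if_pos h2, if_pos h2]
      · have h1 : (pvSplitSp name).length = 1 := by omega
        rw [if_neg h2, if_neg h2, if_pos (by simp [h1])]
    · have hc1 : ((first_name == pvFirst name) : Bool) = false := by
        simp only [beq_eq_false_iff_ne, ne_eq]
        exact fun h => hmatch h.symm
      have hc2 : ((pvFirst name == first_name) : Bool) = false := by
        simp only [beq_eq_false_iff_ne, ne_eq]
        exact hmatch
      rw [List.contains_cons, hc1, Bool.false_or, pvLoopB, ← hfirst, hc2]
      simp only [Bool.false_eq_true, if_false]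
      rw [← ih]
      cases hb : (rest.map pvFirst).contains first_name with
      | false => simp
      | true =>
        rw [if_pos rfl, if_pos rfl, pvScanA, hc2]
        simp only [Bool.false_eq_true, if_false]

-- ===== VERDICT (by name: the statement is the Claim_ definition above) =====
theorem find_lastname_spec : Claim_equal_find_lastname := by
  intro first_name names _
  unfold Spec_find_lastname find_lastname find_lastname_alt
  rw [pvFoldl_append]
  simpa using pvMain first_name names
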